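-- pv_equiv track=rewrite | github.com/albertezem/bagels | guesserBots/humanGuesser.py | decodeResponse
-- ===== SOURCE A (Python) =====
-- def decodeResponse(response: str):
--     # Process fermi, bagels,etc.
--
--     split_response = response.split(",")
--     decoded_response = [0, 0, 0]
--
--     for i in split_response:
--         if i == "Bagels":
--             decoded_response[0] += 1
--         elif i == "Pico":
--             decoded_response[1] += 1
--         elif i == "Fermi":
--             decoded_response[2] += 1
--         elif i == "You win!":
--             return (0, 0, 3)
--
--     return tuple(decoded_response)
-- ===== SOURCE B (Python) =====
-- def decodeResponse(response: str):
--     # B: hoist the win check out, then three independent scans. Objective: simpler.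
--     parts = response.split(",")
--     if "You win!" in parts:
--         return (0, 0, 3)
--     return (parts.count("Bagels"), parts.count("Pico"), parts.count("Fermi"))
-- ===== Notes on version B (the rewrite author's own statement) =====
-- stated objective: simpler
-- what changed: Replaced the single fused loop with branch accumulators and an in-loop early return by a hoisted 'You win!' membership check followed by three independent .count scans.
import Mathlib
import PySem

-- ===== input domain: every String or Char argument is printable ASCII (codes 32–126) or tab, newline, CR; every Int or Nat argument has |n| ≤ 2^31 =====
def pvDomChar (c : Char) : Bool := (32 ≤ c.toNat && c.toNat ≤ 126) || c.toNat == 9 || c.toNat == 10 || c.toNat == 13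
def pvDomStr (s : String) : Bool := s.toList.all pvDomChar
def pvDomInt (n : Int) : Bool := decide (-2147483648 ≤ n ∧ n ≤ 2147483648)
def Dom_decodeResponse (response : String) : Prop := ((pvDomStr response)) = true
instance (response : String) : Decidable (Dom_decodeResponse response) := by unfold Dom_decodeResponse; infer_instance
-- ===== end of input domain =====

-- B hoists the 'You win!' membership check out and counts each token in its own scan; objective: simpler.
-- ===== PORT A =====
def decodeLoop : List String → Int × Int × Int → Int × Int × Int
  | [], acc => acc
  | i :: rest, (b, p, f) =>
    if i == "Bagels" then decodeLoop rest (b + 1, p, f)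
    else if i == "Pico" then decodeLoop rest (b, p + 1, f)
    else if i == "Fermi" then decodeLoop rest (b, p, f + 1)
    else if i == "You win!" then (0, 0, 3)
    else decodeLoop rest (b, p, f)

def decodeResponse (response : String) : Int × Int × Int :=
  decodeLoop (((PySem.Str.split? response ",").getD [])) (0, 0, 0)

-- ===== PORT B =====
def decodeResponse_alt (response : String) : Int × Int × Int :=
  let parts := ((PySem.Str.split? response ",").getD [])
  if "You win!" ∈ parts then (0, 0, 3)
  else ((PySem.List.count parts "Bagels" : Int), (PySem.List.count parts "Pico" : Int), (PySem.List.count parts "Fermi" : Int))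

-- ===== PRECONDITION & SPEC =====
def Spec_decodeResponse (response : String) (out : Int × Int × Int) : Prop := out = decodeResponse_alt response
instance (response : String) (out : Int × Int × Int) : Decidable (Spec_decodeResponse response out) := by unfold Spec_decodeResponse; infer_instance

-- ===== CLAIM (what is proved, stated in full; the proofs are below) =====
def Claim_equal_decodeResponse : Prop := ∀ (response : String), Dom_decodeResponse response → Spec_decodeResponse response (decodeResponse response)

-- ===== LEMMAS AND PROOFS =====

-- ===== VERDICT (by name: the statement is the Claim_ definition above) =====
theorem decodeLoop_spec (l : List String) (b p f : Int) :
    decodeLoop l (b, p, f) =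
      if "You win!" ∈ l then (0, 0, 3)
      else (b + (l.count "Bagels" : Int), p + (l.count "Pico" : Int), f + (l.count "Fermi" : Int)) := by
  induction l generalizing b p f with
  | nil => simp [decodeLoop]
  | cons i rest ih =>
    simp only [decodeLoop, List.mem_cons, List.count_cons]
    by_cases hB : i = "Bagels" <;> by_cases hP : i = "Pico" <;> by_cases hF : i = "Fermi" <;>
      by_cases hW : i = "You win!" <;>
      simp_all <;> split_ifs <;> simp_all <;> ring_nf

theorem decodeResponse_spec : Claim_equal_decodeResponse := by
  intro response _
  unfold Spec_decodeResponse decodeResponse decodeResponse_alt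
  simp only [decodeLoop_spec, PySem.List.count_eq]
  split_ifs <;> simp
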